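-- pv_equiv track=rewrite | github.com/shinianyunyan/txCloudCVMCract | ui/dialogs/instance_config_dialog.py | _categorize_images
-- ===== SOURCE A (Python) =====
-- def _categorize_images(images):
--     """按平台归类镜像"""
--     buckets = {}
--     for img in images or []:
--         platform = (img.get("Platform") or "OTHER").upper()
--         if platform.startswith("WINDOWS"):
--             key = "WINDOWS"
--         elif platform.startswith("UBUNTU"):
--             key = "UBUNTU"
--         elif platform.startswith("CENTOS"):
--             key = "CENTOS"
--         elif platform.startswith("DEBIAN"):
--             key = "DEBIAN"
--         elif platform.startswith("REDHAT"):
--             key = "REDHAT"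
--         elif platform.startswith("SUSE"):
--             key = "SUSE"
--         elif platform.startswith("OPEN"):
--             key = "OPENOS"
--         else:
--             key = "OTHER"
--         buckets.setdefault(key, []).append(img)
--     return buckets
-- ===== SOURCE B (Python) =====
-- _TABLE = (
--     ("WINDOWS", "WINDOWS"),
--     ("UBUNTU", "UBUNTU"),
--     ("CENTOS", "CENTOS"),
--     ("DEBIAN", "DEBIAN"),
--     ("REDHAT", "REDHAT"),
--     ("SUSE", "SUSE"),
--     ("OPEN", "OPENOS"),
-- )
--
--
-- def _key_of(img):
--     platform = (img.get("Platform") or "OTHER").upper()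
--     for pfx, k in _TABLE:
--         if platform.startswith(pfx):
--             return k
--     return "OTHER"
--
--
-- def _categorize_images(images):
--     """按平台归类镜像: two-stage group-by — collect the distinct keys in
--     first-appearance order, then gather each bucket with a per-key filter."""
--     imgs = list(images or [])
--     order = []
--     for img in imgs:
--         k = _key_of(img)
--         if k not in order:
--             order.append(k)
--     return {k: [img for img in imgs if _key_of(img) == k] for k in order}
-- ===== Notes on version B (the rewrite author's own statement) =====
-- stated objective: alternative
-- what changed: Replaces A's single pass that accumulates a dict in place (setdefault+append per element) by a staged group-by: first collect the distinct platform keys in first-appearance order, then build each bucket with a per-key filter over the whole list; the key itself comes from an ordered prefix table scanned by a helper instead of the if/elif chain.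
import Mathlib
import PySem

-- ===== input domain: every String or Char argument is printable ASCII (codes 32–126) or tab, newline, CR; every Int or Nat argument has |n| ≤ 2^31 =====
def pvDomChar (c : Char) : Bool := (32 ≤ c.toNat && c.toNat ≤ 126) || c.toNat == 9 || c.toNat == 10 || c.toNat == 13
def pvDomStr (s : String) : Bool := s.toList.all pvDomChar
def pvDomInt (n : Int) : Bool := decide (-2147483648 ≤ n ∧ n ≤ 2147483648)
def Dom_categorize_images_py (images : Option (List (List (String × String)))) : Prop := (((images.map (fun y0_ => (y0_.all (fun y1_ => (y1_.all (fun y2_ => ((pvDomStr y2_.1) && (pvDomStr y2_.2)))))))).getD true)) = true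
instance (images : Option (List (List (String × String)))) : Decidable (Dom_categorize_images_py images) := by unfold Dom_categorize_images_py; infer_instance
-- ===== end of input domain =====

-- B replaces A's one-pass dict accumulation by a staged group-by (distinct keys in first-appearance
-- order, then a per-key filter), with the key drawn from an ordered prefix table; objective: alternative.

-- ===== PORT A =====
-- (img.get("Platform") or "OTHER").upper()  (shared line of both Pythons)
def pvPlatformOf (img : List (String × String)) : String :=
  PySem.Str.upper
    (match (PySem.Dict.ofList img).get? "Platform" with
     | some s => if s = "" then "OTHER" else s
     | none => "OTHER")

def categorize_images_py (images : Option (List (List (String × String)))) : List (String × List (List (String × String))) :=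
  ((images.getD []).foldl
    (fun (buckets : PySem.Dict String (List (List (String × String)))) img =>
      let platform := pvPlatformOf img
      let key :=
        if PySem.Str.startswith platform "WINDOWS" then "WINDOWS"
        else if PySem.Str.startswith platform "UBUNTU" then "UBUNTU"
        else if PySem.Str.startswith platform "CENTOS" then "CENTOS"
        else if PySem.Str.startswith platform "DEBIAN" then "DEBIAN"
        else if PySem.Str.startswith platform "REDHAT" then "REDHAT"
        else if PySem.Str.startswith platform "SUSE" then "SUSE"
        else if PySem.Str.startswith platform "OPEN" then "OPENOS"
        else "OTHER"
      buckets.modify key [] (· ++ [img]))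
    PySem.Dict.empty).items

-- ===== PORT B =====
def pvTable : List (String × String) :=
  [("WINDOWS", "WINDOWS"), ("UBUNTU", "UBUNTU"), ("CENTOS", "CENTOS"),
   ("DEBIAN", "DEBIAN"), ("REDHAT", "REDHAT"), ("SUSE", "SUSE"), ("OPEN", "OPENOS")]

-- the 'for pfx, k in _TABLE: if platform.startswith(pfx): return k' loop of _key_of
def pvScanTable (table : List (String × String)) (platform : String) : String :=
  match table with
  | [] => "OTHER"
  | (pfx, k) :: rest => if PySem.Str.startswith platform pfx then k else pvScanTable rest platform

def pvKeyOf (img : List (String × String)) : String :=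
  pvScanTable pvTable (pvPlatformOf img)

def categorize_images_py_alt (images : Option (List (List (String × String)))) : List (String × List (List (String × String))) :=
  let imgs := images.getD []
  let order := imgs.foldl (fun (acc : List String) img =>
    let k := pvKeyOf img
    if k ∈ acc then acc else acc ++ [k]) []
  order.map (fun k => (k, imgs.filter (fun img => pvKeyOf img == k)))

-- ===== PRECONDITION & SPEC =====
def Spec_categorize_images_py (images : Option (List (List (String × String)))) (out : List (String × List (List (String × String)))) : Prop := out = categorize_images_py_alt images
instance (images : Option (List (List (String × String)))) (out : List (String × List (List (String × String)))) : Decidable (Spec_categorize_images_py images out) := by unfold Spec_categorize_images_py; infer_instance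

-- ===== CLAIM (what is proved, stated in full; the proofs are below) =====
def Claim_equal_categorize_images_py : Prop := ∀ (images : Option (List (List (String × String)))), Dom_categorize_images_py images → Spec_categorize_images_py images (categorize_images_py images)

-- ===== LEMMAS AND PROOFS =====
-- A's if/elif chain computes the same key as B's table scan
theorem chain_eq_key (p : String) :
    (if PySem.Str.startswith p "WINDOWS" then "WINDOWS"
     else if PySem.Str.startswith p "UBUNTU" then "UBUNTU"
     else if PySem.Str.startswith p "CENTOS" then "CENTOS"
     else if PySem.Str.startswith p "DEBIAN" then "DEBIAN"
     else if PySem.Str.startswith p "REDHAT" then "REDHAT"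
     else if PySem.Str.startswith p "SUSE" then "SUSE"
     else if PySem.Str.startswith p "OPEN" then "OPENOS"
     else "OTHER")
    = pvScanTable pvTable p := by
  simp [pvScanTable, pvTable]
  rfl

-- the accumulated dict of A, rewritten through a key function
theorem orderB (keyf : List (String × String) → String) (l : List (List (String × String))) :
    (l.foldl (fun (acc : List String) img =>
        let k := keyf img
        if k ∈ acc then acc else acc ++ [k]) [])
    = PySem.Set.ofList (l.map keyf) := by
  rw [← PySem.Set.update_nil_left, PySem.Set.update_map_eq_foldl_add]
  have : (fun (s : List String) b => PySem.Set.add s (keyf b))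
      = (fun (acc : List String) img =>
          let k := keyf img
          if k ∈ acc then acc else acc ++ [k]) := by
    funext s b
    simp [PySem.Set.add_eq_ite]
  rw [this]

theorem itemsA (keyf : List (String × String) → String) (l : List (List (String × String))) :
    (l.foldl (fun (d : PySem.Dict String (List (List (String × String)))) img =>
        d.modify (keyf img) [] (· ++ [img])) PySem.Dict.empty).items
    = (PySem.Set.ofList (l.map keyf)).map
        (fun k => (k, l.filter (fun i => keyf i == k))) := by
  set D := (l.foldl (fun (d : PySem.Dict String (List (List (String × String)))) img =>
        d.modify (keyf img) [] (· ++ [img])) PySem.Dict.empty) with hD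
  have hk : D.keys = PySem.Set.ofList (l.map keyf) := by
    rw [hD, PySem.Dict.keys_foldl_modify_key]
    simp [PySem.Set.update_nil_left]
  have hn : D.keys.Nodup := by
    rw [hk]; exact PySem.Set.nodup_ofList _
  rw [PySem.Dict.items_eq_map_keys D hn [], hk]
  refine List.map_congr_left ?_
  intro k _
  have hpair : D = ((l.map (fun i => (keyf i, i))).foldl
      (fun (d : PySem.Dict String (List (List (String × String)))) p =>
        d.modify p.1 [] (· ++ [p.2])) PySem.Dict.empty) := by
    rw [List.foldl_map]
  rw [hpair, PySem.Dict.getD_foldl_modify_append]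
  simp [List.filter_map, Function.comp_def]

-- ===== VERDICT (by name: the statement is the Claim_ definition above) =====
theorem categorize_images_py_spec : Claim_equal_categorize_images_py := by
  intro images _
  unfold Spec_categorize_images_py categorize_images_py categorize_images_py_alt
  simp only []
  rw [orderB]
  have hstep : ∀ (d : PySem.Dict String (List (List (String × String)))) img,
      (let platform := pvPlatformOf img
       let key :=
         if PySem.Str.startswith platform "WINDOWS" then "WINDOWS"
         else if PySem.Str.startswith platform "UBUNTU" then "UBUNTU"
         else if PySem.Str.startswith platform "CENTOS" then "CENTOS"
         else if PySem.Str.startswith platform "DEBIAN" then "DEBIAN"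
         else if PySem.Str.startswith platform "REDHAT" then "REDHAT"
         else if PySem.Str.startswith platform "SUSE" then "SUSE"
         else if PySem.Str.startswith platform "OPEN" then "OPENOS"
         else "OTHER"
       d.modify key [] (· ++ [img]))
      = d.modify (pvKeyOf img) [] (· ++ [img]) := by
    intro d img
    simp only [pvKeyOf]
    rw [chain_eq_key]
  rw [funext fun d => funext fun img => hstep d img]
  exact itemsA pvKeyOf _
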